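-- pv_equiv track=rewrite | github.com/kjrosen/challenges | lemmings.py | furthest
-- ===== SOURCE A (Python) =====
-- def furthest(num_holes, cafes):
--     """Find longest distance between a hole and a cafe.
--
--     find difference between each hole and each cafe
--     """
--
--     max_distance = 0
--
--     for hole in range(num_holes):
--         ## begin by assuming closest cafe is fully across the chain
--         closest = num_holes
--
--         for cafe in cafes:
--             distance = abs(hole-cafe)
--             closest = min(distance, closest)
--
--         max_distance = max(closest, max_distance)
--
--     return max_distance
-- ===== SOURCE B (Python) =====
-- def furthest(num_holes, cafes):
--     """Find longest distance between a hole and a cafe.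
--
--     Two-pass distance sweep: seed each hole position with the cost of the
--     cafe that "enters" there (cafes outside the chain enter at an end),
--     then propagate minima left-to-right and right-to-left; the answer is
--     the largest per-hole minimum.  O(n + c) instead of O(n * c).
--     """
--     if num_holes <= 0:
--         return 0
--     n = num_holes
--     src = {}
--     for c in cafes:
--         p = 0 if c < 0 else (n - 1 if c >= n else c)
--         src[p] = min(src.get(p, n), abs(c - p))
--     left = []
--     run = n
--     for p in range(n):
--         run = min(src.get(p, n), run + 1)
--         left.append(run)
--     right = []
--     run = n
--     for p in reversed(range(n)):
--         run = min(src.get(p, n), run + 1)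
--         right.append(run)
--     right.reverse()
--     best = 0
--     for l, r in zip(left, right):
--         best = max(best, min(l, r))
--     return best
-- ===== Notes on version B (the rewrite author's own statement) =====
-- stated objective: faster
-- what changed: Replaced the nested scan (for every hole, scan all cafes for the nearest) by a linear two-pass distance sweep: each cafe seeds its clamped position in a dict with its entry cost, then one left-to-right and one right-to-left min-propagation pass give every hole's nearest-cafe distance, and the answer is the largest of these.
import Mathlib
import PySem

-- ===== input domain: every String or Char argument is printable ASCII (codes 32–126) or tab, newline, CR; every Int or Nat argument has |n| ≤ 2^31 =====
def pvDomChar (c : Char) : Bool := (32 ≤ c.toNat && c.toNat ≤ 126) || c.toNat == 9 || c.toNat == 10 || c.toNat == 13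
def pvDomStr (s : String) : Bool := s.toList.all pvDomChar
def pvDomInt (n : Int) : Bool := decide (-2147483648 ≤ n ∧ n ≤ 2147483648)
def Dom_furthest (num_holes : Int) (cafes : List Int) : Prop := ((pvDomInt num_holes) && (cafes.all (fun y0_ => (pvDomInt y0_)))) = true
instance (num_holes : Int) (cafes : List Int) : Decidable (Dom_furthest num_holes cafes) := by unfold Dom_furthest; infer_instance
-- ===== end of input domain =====

-- B replaces A's nested scan by a two-pass minimum-propagation sweep (seed positions from a
-- dict of clamped cafes, sweep left and right, take the largest per-hole minimum): O(n+c) vs O(n*c).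

-- ===== PORT A =====
def furthest (num_holes : Int) (cafes : List Int) : Int :=
  (PySem.List.pyRange 0 num_holes 1).foldl
    (fun max_distance hole =>
      let closest := cafes.foldl (fun closest cafe => min |hole - cafe| closest) num_holes
      max closest max_distance)
    0

-- ===== PORT B =====
def furthest_alt (num_holes : Int) (cafes : List Int) : Int :=
  if num_holes ≤ 0 then 0
  else
    let n := num_holes
    let src : PySem.Dict Int Int := cafes.foldl (fun d c =>
        let p := if c < 0 then 0 else if n ≤ c then n - 1 else c
        d.insert p (min (d.getD p n) |c - p|)) PySem.Dict.empty
    let left := ((PySem.List.pyRange 0 n 1).foldl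
        (fun (st : Int × List Int) p =>
          let run := min (src.getD p n) (st.1 + 1)
          (run, st.2 ++ [run])) (n, ([] : List Int))).2
    let right := (((PySem.List.pyRange 0 n 1).reverse).foldl
        (fun (st : Int × List Int) p =>
          let run := min (src.getD p n) (st.1 + 1)
          (run, st.2 ++ [run])) (n, ([] : List Int))).2
    let rightR := right.reverse
    (left.zip rightR).foldl (fun best lr => max best (min lr.1 lr.2)) 0

-- ===== PRECONDITION & SPEC =====
def Spec_furthest (num_holes : Int) (cafes : List Int) (out : Int) : Prop := out = furthest_alt num_holes cafes
instance (num_holes : Int) (cafes : List Int) (out : Int) : Decidable (Spec_furthest num_holes cafes out) := by unfold Spec_furthest; infer_instance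

-- ===== CLAIM (what is proved, stated in full; the proofs are below) =====
def Claim_equal_furthest : Prop := ∀ (num_holes : Int) (cafes : List Int), Dom_furthest num_holes cafes → Spec_furthest num_holes cafes (furthest num_holes cafes)

-- ===== LEMMAS AND PROOFS =====

-- where cafe c enters the chain [0, n), and A's per-hole nearest-cafe fold
def clampP (n c : Int) : Int := if c < 0 then 0 else if n ≤ c then n - 1 else c

def cloF (n : Int) (cafes : List Int) (i : Int) : Int :=
  cafes.foldl (fun closest cafe => min |i - cafe| closest) n

-- the seeding dict of B and its per-position value
def srcF (n : Int) (cafes : List Int) : PySem.Dict Int Int :=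
  cafes.foldl (fun d c =>
    d.insert (clampP n c) (min (d.getD (clampP n c) n) |c - clampP n c|)) PySem.Dict.empty

def Sv (n : Int) (cafes : List Int) (p : Int) : Int := (srcF n cafes).getD p n

-- pure form of B's append-scan loop
def scanL (f : Int → Int) : Int → List Int → List Int
  | _, [] => []
  | run, p :: ps => min (f p) (run + 1) :: scanL f (min (f p) (run + 1)) ps

def runEnd (f : Int → Int) : Int → List Int → Int
  | run, [] => run
  | run, p :: ps => runEnd f (min (f p) (run + 1)) ps

theorem foldl_scan (f : Int → Int) : ∀ (l : List Int) (run : Int) (acc : List Int),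
    l.foldl (fun (st : Int × List Int) p =>
      (min (f p) (st.1 + 1), st.2 ++ [min (f p) (st.1 + 1)])) (run, acc)
      = (runEnd f run l, acc ++ scanL f run l) := by
  intro l
  induction l with
  | nil => intro run acc; simp [runEnd, scanL]
  | cons p ps ih => intro run acc; simp [List.foldl_cons, runEnd, scanL, ih]

theorem scanL_length (f : Int → Int) : ∀ (run : Int) (l : List Int),
    (scanL f run l).length = l.length := by
  intro run l
  induction l generalizing run with
  | nil => rfl
  | cons p ps ih => simp [scanL, ih]

theorem scanL_le_run (f : Int → Int) : ∀ (l : List Int) (run : Int) (i : Nat)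
    (hi : i < (scanL f run l).length),
    (scanL f run l)[i] ≤ run + i + 1 := by
  intro l
  induction l with
  | nil => intro run i hi; simp [scanL] at hi
  | cons p ps ih =>
    intro run i hi
    cases i with
    | zero =>
      simp only [scanL, List.getElem_cons_zero]
      have := min_le_right (f p) (run + 1)
      push_cast; omega
    | succ i =>
      have h2 : i < (scanL f (min (f p) (run + 1)) ps).length := by
        simp [scanL] at hi ⊢; omega
      have := ih (min (f p) (run + 1)) i h2
      simp only [scanL, List.getElem_cons_succ]
      have : (scanL f (min (f p) (run + 1)) ps)[i] ≤ run + 1 + i + 1 := by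
        refine le_trans this ?_; have := min_le_right (f p) (run + 1); omega
      push_cast; omega

theorem scanL_ub (f : Int → Int) : ∀ (l : List Int) (run : Int) (i j : Nat)
    (_hj : j ≤ i) (_hi : i < (scanL f run l).length) (_hj2 : j < l.length),
    (scanL f run l)[i] ≤ f (l[j]) + ((i : Int) - j) := by
  intro l
  induction l with
  | nil => intro run i j _ hi _; simp [scanL] at hi
  | cons p ps ih =>
    intro run i j hj hi hj2
    cases j with
    | zero =>
      cases i with
      | zero => simp [scanL]
      | succ i =>
        have h2 : i < (scanL f (min (f p) (run + 1)) ps).length := by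
          simp [scanL] at hi ⊢; omega
        have := scanL_le_run f ps (min (f p) (run + 1)) i h2
        simp only [scanL, List.getElem_cons_succ, List.getElem_cons_zero]
        have hm : min (f p) (run + 1) ≤ f p := min_le_left _ _
        push_cast; omega
    | succ j =>
      cases i with
      | zero => omega
      | succ i =>
        have h2 : i < (scanL f (min (f p) (run + 1)) ps).length := by
          simp [scanL] at hi ⊢; omega
        have h3 : j < ps.length := by simp at hj2; omega
        have := ih (min (f p) (run + 1)) i j (by omega) h2 h3
        simp only [scanL, List.getElem_cons_succ]
        refine le_trans this ?_; push_cast; omega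

theorem scanL_cases (f : Int → Int) : ∀ (l : List Int) (run : Int) (i : Nat)
    (hi : i < (scanL f run l).length),
    (scanL f run l)[i] = run + i + 1 ∨
      ∃ j : Nat, j ≤ i ∧ ∃ hj : j < l.length, (scanL f run l)[i] = f (l[j]) + ((i : Int) - j) := by
  intro l
  induction l with
  | nil => intro run i hi; simp [scanL] at hi
  | cons p ps ih =>
    intro run i hi
    cases i with
    | zero =>
      rcases min_cases (f p) (run + 1) with ⟨h, _⟩ | ⟨h, _⟩
      · right; exact ⟨0, le_refl _, by simp, by simp [scanL, h]⟩
      · left; simp [scanL, h]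
    | succ i =>
      have h2 : i < (scanL f (min (f p) (run + 1)) ps).length := by
        simp [scanL] at hi ⊢; omega
      rcases ih (min (f p) (run + 1)) i h2 with h | ⟨j, hj, hjl, h⟩
      · rcases min_cases (f p) (run + 1) with ⟨hm, _⟩ | ⟨hm, _⟩
        · right
          refine ⟨0, by omega, by simp, ?_⟩
          simp only [scanL, List.getElem_cons_succ, List.getElem_cons_zero]
          rw [h, hm]; push_cast; ring
        · left
          simp only [scanL, List.getElem_cons_succ]
          rw [h, hm]; push_cast; ring
      · right
        refine ⟨j + 1, by omega, by simp; omega, ?_⟩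
        simp only [scanL, List.getElem_cons_succ]
        rw [h]; push_cast; ring

-- generic min-fold facts (body 'min acc (f c)')
theorem minfold_le_init (f : Int → Int) : ∀ (l : List Int) (a : Int),
    l.foldl (fun acc c => min acc (f c)) a ≤ a := by
  intro l
  induction l with
  | nil => intro a; simp
  | cons c cs ih =>
    intro a
    calc cs.foldl (fun acc c => min acc (f c)) (min a (f c)) ≤ min a (f c) := ih _
      _ ≤ a := min_le_left _ _

theorem minfold_le_mem (f : Int → Int) : ∀ (l : List Int) (a c : Int), c ∈ l →
    l.foldl (fun acc c => min acc (f c)) a ≤ f c := by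
  intro l
  induction l with
  | nil => intro a c hc; simp at hc
  | cons x xs ih =>
    intro a c hc
    rcases List.mem_cons.mp hc with rfl | hc
    · calc xs.foldl (fun acc c => min acc (f c)) (min a (f c)) ≤ min a (f c) :=
        minfold_le_init f xs _
        _ ≤ f c := min_le_right _ _
    · exact ih _ c hc

theorem minfold_cases (f : Int → Int) : ∀ (l : List Int) (a : Int),
    l.foldl (fun acc c => min acc (f c)) a = a ∨
      ∃ c ∈ l, l.foldl (fun acc c => min acc (f c)) a = f c := by
  intro l
  induction l with
  | nil => intro a; left; rfl
  | cons x xs ih =>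
    intro a
    rcases ih (min a (f x)) with h | ⟨c, hc, h⟩
    · rcases min_cases a (f x) with ⟨hm, _⟩ | ⟨hm, _⟩
      · left; simpa [hm] using h
      · right; exact ⟨x, by simp, by simpa [hm] using h⟩
    · right; exact ⟨c, by simp [hc], h⟩

-- A's per-hole fold in min-fold form
theorem cloF_eq (n : Int) (cafes : List Int) (i : Int) :
    cloF n cafes i = cafes.foldl (fun acc c => min acc |i - c|) n := by
  unfold cloF
  exact PySem.List.foldl_congr_mem cafes _ _ n (fun acc c _ => min_comm _ _)

theorem cloF_le_init (n : Int) (cafes : List Int) (i : Int) : cloF n cafes i ≤ n := by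
  rw [cloF_eq]; exact minfold_le_init _ _ _

theorem cloF_le_mem (n : Int) (cafes : List Int) (i c : Int) (hc : c ∈ cafes) :
    cloF n cafes i ≤ |i - c| := by
  rw [cloF_eq]; exact minfold_le_mem _ _ _ _ hc

theorem cloF_cases (n : Int) (cafes : List Int) (i : Int) :
    cloF n cafes i = n ∨ ∃ c ∈ cafes, cloF n cafes i = |i - c| := by
  rw [cloF_eq]; exact minfold_cases _ _ _

-- characterization of B's dict of seeds
theorem srcF_getD (n : Int) (cafes : List Int) (p : Int) :
    Sv n cafes p = cafes.foldl
      (fun a c => if clampP n c = p then min a |c - p| else a) n := by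
  unfold Sv srcF
  have key : ∀ (l : List Int) (d : PySem.Dict Int Int),
      (l.foldl (fun d c =>
        d.insert (clampP n c) (min (d.getD (clampP n c) n) |c - clampP n c|)) d).getD p n
      = l.foldl (fun a c => if clampP n c = p then min a |c - p| else a) (d.getD p n) := by
    intro l
    induction l with
    | nil => intro d; rfl
    | cons c cs ih =>
      intro d
      rw [List.foldl_cons, List.foldl_cons, ih]
      congr 1
      rw [PySem.Dict.getD_insert]
      by_cases h : clampP n c = p
      · simp [h, min_comm]
      · simp [h, Ne.symm h]
  rw [key]
  simp [PySem.Dict.getD_empty]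

theorem Sv_le_n (n : Int) (cafes : List Int) (p : Int) : Sv n cafes p ≤ n := by
  rw [srcF_getD, PySem.List.foldl_ite_eq_foldl_filter]
  exact minfold_le_init _ _ _

theorem Sv_le_mem (n : Int) (cafes : List Int) (c : Int) (hc : c ∈ cafes) :
    Sv n cafes (clampP n c) ≤ |c - clampP n c| := by
  rw [srcF_getD, PySem.List.foldl_ite_eq_foldl_filter]
  exact minfold_le_mem _ _ _ _ (List.mem_filter.mpr ⟨hc, by simp⟩)

theorem Sv_cases (n : Int) (cafes : List Int) (p : Int) :
    Sv n cafes p = n ∨ ∃ c ∈ cafes, clampP n c = p ∧ Sv n cafes p = |c - p| := by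
  rw [srcF_getD, PySem.List.foldl_ite_eq_foldl_filter]
  rcases minfold_cases (fun c => |c - p|) (cafes.filter fun c => decide (clampP n c = p)) n with
    h | ⟨c, hc, h⟩
  · left; exact h
  · right
    rcases List.mem_filter.mp hc with ⟨hc1, hc2⟩
    exact ⟨c, hc1, by simpa using hc2, h⟩

-- every seeded value plus the walk is at least A's nearest distance
theorem cloF_le_Sv_add (n : Int) (cafes : List Int) (i p : Int) :
    cloF n cafes i ≤ Sv n cafes p + |i - p| := by
  rcases Sv_cases n cafes p with h | ⟨c, hc, _, h⟩
  · have h1 := cloF_le_init n cafes i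
    have h2 := abs_nonneg (i - p)
    omega
  · have h1 := cloF_le_mem n cafes i c hc
    have h2 : |i - c| ≤ |i - p| + |p - c| := abs_sub_le i p c
    rw [h, abs_sub_comm c p]
    omega

-- clamp arithmetic: for a hole i on the side of the entry point, entry cost + walk = |i - c|
theorem clamp_cost_left (n c i : Int) (h0 : 0 ≤ i) (hn : i < n)
    (hp : clampP n c ≤ i) : |c - clampP n c| + (i - clampP n c) = |i - c| := by
  unfold clampP at *
  split_ifs at hp ⊢ with h1 h2 <;>
    rw [Int.abs_eq_natAbs, Int.abs_eq_natAbs] <;> omega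

theorem clamp_cost_right (n c i : Int) (h0 : 0 ≤ i) (hn : i < n)
    (hp : i ≤ clampP n c) : |c - clampP n c| + (clampP n c - i) = |i - c| := by
  unfold clampP at *
  split_ifs at hp ⊢ with h1 h2 <;>
    rw [Int.abs_eq_natAbs, Int.abs_eq_natAbs] <;> omega

theorem clampP_range (n c : Int) (hn : 0 < n) : 0 ≤ clampP n c ∧ clampP n c < n := by
  unfold clampP; split_ifs <;> omega

-- the two sweep lists of B
def Lsc (n : Int) (cafes : List Int) : List Int :=
  scanL (Sv n cafes) n (PySem.List.pyRange 0 n 1)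

def Rsc (n : Int) (cafes : List Int) : List Int :=
  (scanL (Sv n cafes) n ((PySem.List.pyRange 0 n 1).reverse)).reverse

theorem Lsc_length (n : Int) (cafes : List Int) : (Lsc n cafes).length = n.toNat := by
  unfold Lsc; rw [scanL_length, PySem.List.length_pyRange_one]; simp

theorem Rsc_length (n : Int) (cafes : List Int) : (Rsc n cafes).length = n.toNat := by
  unfold Rsc
  rw [List.length_reverse, scanL_length, List.length_reverse, PySem.List.length_pyRange_one]
  simp

theorem pyr_get (n : Int) (j : Nat) (hj : j < (PySem.List.pyRange 0 n 1).length) :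
    (PySem.List.pyRange 0 n 1)[j] = (j : Int) := by
  rw [PySem.List.getElem_pyRange_one]; simp

theorem pyr_rev_get (n : Int) (j : Nat) (hj : j < (PySem.List.pyRange 0 n 1).reverse.length) :
    (PySem.List.pyRange 0 n 1).reverse[j] = ((n.toNat : Int) - 1 - j) := by
  have hl : (PySem.List.pyRange 0 n 1).length = n.toNat := by
    rw [PySem.List.length_pyRange_one]; simp
  have hj' : j < n.toNat := by rw [List.length_reverse, hl] at hj; exact hj
  rw [List.getElem_reverse, pyr_get]
  rw [hl]
  omega

theorem Lsc_ub (n : Int) (cafes : List Int) (k p : Nat) (hp : p ≤ k)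
    (hk : k < (Lsc n cafes).length) :
    (Lsc n cafes)[k] ≤ Sv n cafes p + ((k : Int) - p) := by
  have hp2 : p < (PySem.List.pyRange 0 n 1).length := by
    have := scanL_length (Sv n cafes) n (PySem.List.pyRange 0 n 1)
    unfold Lsc at hk; omega
  have h := scanL_ub (Sv n cafes) (PySem.List.pyRange 0 n 1) n k p hp hk hp2
  rw [pyr_get] at h
  exact h

theorem Lsc_cases (n : Int) (cafes : List Int) (k : Nat) (hk : k < (Lsc n cafes).length) :
    (Lsc n cafes)[k] = n + k + 1 ∨
      ∃ j : Nat, j ≤ k ∧ (Lsc n cafes)[k] = Sv n cafes j + ((k : Int) - j) := by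
  rcases scanL_cases (Sv n cafes) (PySem.List.pyRange 0 n 1) n k hk with h | ⟨j, hj, hjl, h⟩
  · left; exact h
  · right
    rw [pyr_get] at h
    exact ⟨j, hj, h⟩


theorem Rsc_ub (n : Int) (cafes : List Int) (k p : Nat) (hkp : k ≤ p) (hpn : p < n.toNat)
    (hk : k < (Rsc n cafes).length) :
    (Rsc n cafes)[k] ≤ Sv n cafes p + ((p : Int) - k) := by
  have hSRlen : (scanL (Sv n cafes) n (PySem.List.pyRange 0 n 1).reverse).length = n.toNat := by
    rw [scanL_length, List.length_reverse, PySem.List.length_pyRange_one]; simp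
  have hk' : k < n.toNat := by rw [Rsc_length] at hk; exact hk
  unfold Rsc
  rw [List.getElem_reverse]
  have hieq : (scanL (Sv n cafes) n (PySem.List.pyRange 0 n 1).reverse).length - 1 - k
      = n.toNat - 1 - k := by omega
  have h := scanL_ub (Sv n cafes) ((PySem.List.pyRange 0 n 1).reverse) n
    ((scanL (Sv n cafes) n (PySem.List.pyRange 0 n 1).reverse).length - 1 - k)
    (n.toNat - 1 - p) (by omega)
    (by omega)
    (by rw [List.length_reverse, PySem.List.length_pyRange_one]; simp; omega)
  rw [pyr_rev_get] at h
  have e1 : ((n.toNat : Int) - 1 - ((n.toNat - 1 - p : Nat) : Int)) = (p : Int) := by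
    omega
  have e2 : ((((scanL (Sv n cafes) n (PySem.List.pyRange 0 n 1).reverse).length - 1 - k : Nat) : Int)
      - ((n.toNat - 1 - p : Nat) : Int)) = (p : Int) - k := by
    rw [hSRlen]; omega
  rw [e1, e2] at h
  exact h

theorem Rsc_cases (n : Int) (cafes : List Int) (k : Nat) (hk : k < (Rsc n cafes).length) :
    (∃ m : Nat, (Rsc n cafes)[k] = n + m + 1) ∨
      ∃ p : Nat, k ≤ p ∧ p < n.toNat ∧ (Rsc n cafes)[k] = Sv n cafes p + ((p : Int) - k) := by
  have hSRlen : (scanL (Sv n cafes) n (PySem.List.pyRange 0 n 1).reverse).length = n.toNat := by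
    rw [scanL_length, List.length_reverse, PySem.List.length_pyRange_one]; simp
  have hk' : k < n.toNat := by rw [Rsc_length] at hk; exact hk
  unfold Rsc
  rw [List.getElem_reverse]
  rcases scanL_cases (Sv n cafes) ((PySem.List.pyRange 0 n 1).reverse) n
      ((scanL (Sv n cafes) n (PySem.List.pyRange 0 n 1).reverse).length - 1 - k)
      (by omega) with h | ⟨j, hj, hjl, h⟩
  · left
    exact ⟨_, h⟩
  · right
    rw [pyr_rev_get] at h
    have hjn : j < n.toNat := by rw [List.length_reverse, PySem.List.length_pyRange_one] at hjl; omega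
    refine ⟨n.toNat - 1 - j, by omega, by omega, ?_⟩
    have e1 : ((n.toNat : Int) - 1 - (j : Int)) = ((n.toNat - 1 - j : Nat) : Int) := by
      omega
    have e2 : ((((scanL (Sv n cafes) n (PySem.List.pyRange 0 n 1).reverse).length - 1 - k : Nat) : Int)
        - (j : Int)) = ((n.toNat - 1 - j : Nat) : Int) - k := by
      rw [hSRlen] at hj ⊢; omega
    rw [e1, e2] at h
    exact h

theorem Lsc_lb (n : Int) (cafes : List Int) (k : Nat) (hk : k < (Lsc n cafes).length) :
    cloF n cafes k ≤ (Lsc n cafes)[k] := by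
  rcases Lsc_cases n cafes k hk with h | ⟨j, hj, h⟩
  · have h1 := cloF_le_init n cafes k
    omega
  · have h1 := cloF_le_Sv_add n cafes k j
    have h2 : |(k : Int) - j| = (k : Int) - j := by rw [Int.abs_eq_natAbs]; omega
    rw [h2] at h1
    omega

theorem Rsc_lb (n : Int) (cafes : List Int) (k : Nat) (hk : k < (Rsc n cafes).length) :
    cloF n cafes k ≤ (Rsc n cafes)[k] := by
  rcases Rsc_cases n cafes k hk with ⟨m, h⟩ | ⟨p, hkp, hpn, h⟩
  · have h1 := cloF_le_init n cafes k
    omega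
  · have h1 := cloF_le_Sv_add n cafes k p
    have h2 : |(k : Int) - p| = (p : Int) - k := by rw [Int.abs_eq_natAbs]; omega
    rw [h2] at h1
    omega

-- the core per-hole identity: min(left[i], right[i]) = A's closest(i)
theorem core_index (n : Int) (cafes : List Int) (hn : 0 < n) (k : Nat)
    (hkL : k < (Lsc n cafes).length) (hkR : k < (Rsc n cafes).length) :
    min ((Lsc n cafes)[k]) ((Rsc n cafes)[k]) = cloF n cafes k := by
  have hk : (k : Int) < n := by rw [Lsc_length] at hkL; omega
  apply le_antisymm
  · rcases cloF_cases n cafes k with h | ⟨c, hc, h⟩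
    · rw [h]
      have h1 := Lsc_ub n cafes k k (le_refl _) hkL
      have h2 := Sv_le_n n cafes k
      have h3 : (Lsc n cafes)[k] ≤ n := by omega
      exact le_trans (min_le_left _ _) h3
    · rw [h]
      have hpr := clampP_range n c hn
      have hcast : ((clampP n c).toNat : Int) = clampP n c := by omega
      by_cases hpk : clampP n c ≤ (k : Int)
      · have h1 := Lsc_ub n cafes k (clampP n c).toNat (by omega) hkL
        have h2 := Sv_le_mem n cafes c hc
        have h3 := clamp_cost_left n c k (by omega) hk hpk
        rw [hcast] at h1
        refine le_trans (min_le_left _ _) ?_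
        omega
      · have hpk' : (k : Int) ≤ clampP n c := by omega
        have h1 := Rsc_ub n cafes k (clampP n c).toNat (by omega) (by omega) hkR
        have h2 := Sv_le_mem n cafes c hc
        have h3 := clamp_cost_right n c k (by omega) hk hpk'
        rw [hcast] at h1
        refine le_trans (min_le_right _ _) ?_
        omega
  · exact le_min (Lsc_lb n cafes k hkL) (Rsc_lb n cafes k hkR)

-- assembled form of B for positive n
theorem furthest_alt_eq (n : Int) (cafes : List Int) (hn : 0 < n) :
    furthest_alt n cafes = ((Lsc n cafes).zip (Rsc n cafes)).foldl
      (fun best lr => max best (min lr.1 lr.2)) 0 := by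
  unfold furthest_alt Lsc Rsc
  rw [if_neg (by omega)]
  have hsrc : (cafes.foldl (fun d c =>
      let p := if c < 0 then 0 else if n ≤ c then n - 1 else c
      d.insert p (min (d.getD p n) |c - p|)) PySem.Dict.empty) = srcF n cafes := by
    unfold srcF clampP; rfl
  simp only [hsrc]
  rw [foldl_scan (fun p => (srcF n cafes).getD p n) (PySem.List.pyRange 0 n 1) n []]
  rw [foldl_scan (fun p => (srcF n cafes).getD p n) ((PySem.List.pyRange 0 n 1).reverse) n []]
  rfl

theorem furthest_eq_cloF (n : Int) (cafes : List Int) :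
    furthest n cafes = (PySem.List.pyRange 0 n 1).foldl
      (fun m i => max (cloF n cafes i) m) 0 := by
  unfold furthest cloF
  rfl

-- ===== VERDICT (by name: the statement is the Claim_ definition above) =====
theorem furthest_spec : Claim_equal_furthest := by
  intro n cafes _
  unfold Spec_furthest
  by_cases hn : n ≤ 0
  · rw [furthest_eq_cloF, PySem.List.pyRange_one_eq_nil (by omega)]
    unfold furthest_alt
    rw [if_pos hn]
    rfl
  · have hn' : 0 < n := by omega
    rw [furthest_eq_cloF, furthest_alt_eq n cafes hn']
    have hmap : ((Lsc n cafes).zip (Rsc n cafes)).map (fun lr => min lr.1 lr.2)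
        = (PySem.List.pyRange 0 n 1).map (cloF n cafes) := by
      apply List.ext_getElem
      · rw [List.length_map, List.length_map, List.length_zip, Lsc_length, Rsc_length,
          PySem.List.length_pyRange_one]
        simp
      · intro k hk1 hk2
        have hk1' : k < n.toNat := by
          rw [List.length_map, List.length_zip, Lsc_length, Rsc_length] at hk1; omega
        simp only [List.getElem_map, List.getElem_zip]
        rw [core_index n cafes hn' k (by rw [Lsc_length]; omega) (by rw [Rsc_length]; omega)]
        congr 1
        exact (pyr_get n k (by rw [PySem.List.length_pyRange_one]; simp; omega)).symm
    calc (PySem.List.pyRange 0 n 1).foldl (fun m i => max (cloF n cafes i) m) 0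
        = ((PySem.List.pyRange 0 n 1).map (cloF n cafes)).foldl (fun m x => max x m) 0 := by
          rw [List.foldl_map]
      _ = ((PySem.List.pyRange 0 n 1).map (cloF n cafes)).foldl (fun m x => max m x) 0 :=
          PySem.List.foldl_congr_mem _ _ _ _ (fun acc x _ => max_comm _ _)
      _ = (((Lsc n cafes).zip (Rsc n cafes)).map (fun lr => min lr.1 lr.2)).foldl
            (fun m x => max m x) 0 := by rw [hmap]
      _ = ((Lsc n cafes).zip (Rsc n cafes)).foldl
            (fun best lr => max best (min lr.1 lr.2)) 0 := by
          rw [List.foldl_map]
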